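-- pv_equiv track=rewrite | github.com/ebeilmann/text_msg_reader | functions.py | remove_nonmsg
-- ===== SOURCE A (Python) =====
-- invalid_msg_content=["\x01","\x05","\n"]                            #A list of characters that followed right after text messages ###(Specification 3.0.1)###
--
-- def remove_nonmsg(line):
--     if line[10]=='T':                                               #Some invalid messages had a capital T at index 10 so we got rid of those
--         return
--     for invalid in invalid_msg_content:
--         if invalid in line:
--             invalidloc=line.find(invalid)                           #Find the index number of the invalid message content
--             line=line[:invalidloc]                                  #Then we get rid of everything from that point on
--     return line
-- ===== SOURCE B (Python) =====
-- invalid_chars = {"\x01", "\x05", "\n"}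
--
-- def remove_nonmsg(line):
--     if line[10] == 'T':
--         return None
--     for i, ch in enumerate(line):
--         if ch in invalid_chars:
--             return line[:i]
--     return line
-- ===== Notes on version B (the rewrite author's own statement) =====
-- stated objective: idiomatic
-- what changed: A truncates the line repeatedly, one find-and-slice pass per invalid character in the constant list; B makes a single forward scan with enumerate and returns line[:i] at the first character found in a set of invalid characters (proved equal because sequential truncation cuts at the minimum first-occurrence index).
import Mathlib
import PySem

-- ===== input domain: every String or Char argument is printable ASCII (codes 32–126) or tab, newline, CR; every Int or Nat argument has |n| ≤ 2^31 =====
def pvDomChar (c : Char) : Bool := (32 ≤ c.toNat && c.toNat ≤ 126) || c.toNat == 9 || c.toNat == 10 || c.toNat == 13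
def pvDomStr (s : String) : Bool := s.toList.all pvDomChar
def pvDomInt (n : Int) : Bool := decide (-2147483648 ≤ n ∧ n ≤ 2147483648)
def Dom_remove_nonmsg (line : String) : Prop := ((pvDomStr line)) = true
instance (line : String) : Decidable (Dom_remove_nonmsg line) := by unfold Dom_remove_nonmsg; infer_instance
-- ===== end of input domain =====

-- B replaces A's per-invalid-character find/truncate passes by one forward scan that cuts at the
-- first invalid character (objective: idiomatic single pass; same asymptotic cost).
-- ===== PORT A =====
def invalid_msg_content : List String := ["\x01", "\x05", "\n"]

def remove_nonmsg (line : String) : Option String :=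
  match PySem.Str.pyGet? line 10 with
  | none => none   -- dead arm: Python raises IndexError here; excluded by Pre_remove_nonmsg
  | some c =>
    if c = 'T' then none
    else
      some (invalid_msg_content.foldl
        (fun line invalid =>
          if PySem.Str.isIn invalid line then
            PySem.Str.slice line none (some (PySem.Str.find line invalid))
          else line)
        line)

-- ===== PORT B =====
def invalid_chars : PySem.Set Char := PySem.Set.ofList ['\x01', '\x05', '\n']

def altGo (line : String) : List (Int × Char) → String
  | [] => line
  | (i, ch) :: rest =>
    if invalid_chars.contains ch then PySem.Str.slice line none (some i)
    else altGo line rest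

def remove_nonmsg_alt (line : String) : Option String :=
  match PySem.Str.pyGet? line 10 with
  | none => none   -- dead arm: Python raises IndexError here; excluded by Pre_remove_nonmsg
  | some c =>
    if c = 'T' then none
    else some (altGo line (PySem.List.enumerate line.toList))

-- ===== PRECONDITION & SPEC =====
-- Pre_ excludes exactly the strings of length ≤ 10, on which the Python `line[10]` raises IndexError.
def Pre_remove_nonmsg (line : String) : Prop := 10 < line.toList.length
instance (line : String) : Decidable (Pre_remove_nonmsg line) := by unfold Pre_remove_nonmsg; infer_instance
def pvWitness_remove_nonmsg : String := "hello world"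

def Spec_remove_nonmsg (line : String) (out : Option String) : Prop := out = remove_nonmsg_alt line
instance (line : String) (out : Option String) : Decidable (Spec_remove_nonmsg line out) := by unfold Spec_remove_nonmsg; infer_instance

-- ===== CLAIM (what is proved, stated in full; the proofs are below) =====
def Claim_equal_remove_nonmsg : Prop := ∀ (line : String), Dom_remove_nonmsg line → Pre_remove_nonmsg line → Spec_remove_nonmsg line (remove_nonmsg line)

-- ===== LEMMAS AND PROOFS =====

-- the character-list predicate "is a valid message character"
def goodChar (c : Char) : Bool := !(c = '\x01' || c = '\x05' || c = '\n')

-- find.go for a single-character needle is idxOf (shifted by the accumulator), or -1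
theorem find_go_single (c : Char) (cs : List Char) (k : Nat) :
    PySem.Chars.find.go [c] cs k = if c ∈ cs then ((k + cs.idxOf c : Nat) : Int) else -1 := by
  induction cs generalizing k with
  | nil => simp [PySem.Chars.find.go]
  | cons h t ih =>
    by_cases hc : h = c
    · subst hc
      simp [PySem.Chars.find.go, List.isPrefixOf]
    · have : ¬ c = h := fun e => hc e.symm
      simp [PySem.Chars.find.go, List.isPrefixOf, hc, this, ih]
      by_cases hm : c ∈ t
      · simp [hm]; ring
      · simp [hm]

theorem take_idxOf_eq_takeWhile (c : Char) (cs : List Char) (h : c ∈ cs) :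
    cs.take (cs.idxOf c) = cs.takeWhile (fun x => x != c) := by
  induction cs with
  | nil => simp at h
  | cons a t ih =>
    by_cases hc : a = c
    · subst hc; simp
    · have : ¬ c = a := fun e => hc e.symm
      have hm : c ∈ t := by simpa [this] using h
      simp [hc, ih hm]

theorem takeWhile_of_not_mem (c : Char) (cs : List Char) (h : c ∉ cs) :
    cs.takeWhile (fun x => x != c) = cs := by
  induction cs with
  | nil => rfl
  | cons a t ih =>
    have h1 : ¬ a = c := fun e => h (e ▸ List.mem_cons_self)
    have h2 : c ∉ t := fun m => h (List.mem_cons_of_mem _ m)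
    simp [h1, ih h2]

-- one pass of A's loop body, for a single-character needle, is takeWhile (≠ c)
theorem stepStr (c : Char) (sub : String) (hs : sub.toList = [c]) (line : String) :
    (if PySem.Str.isIn sub line then
        PySem.Str.slice line none (some (PySem.Str.find line sub))
      else line)
    = String.ofList (line.toList.takeWhile (fun x => x != c)) := by
  have hfind : PySem.Str.find line sub
      = if c ∈ line.toList then ((line.toList.idxOf c : Nat) : Int) else -1 := by
    rw [PySem.Str.find_eq, hs]
    show PySem.Chars.find.go [c] line.toList 0 = _
    simp [find_go_single]
  have hin : PySem.Str.isIn sub line = (c ∈ line.toList) := by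
    rw [PySem.Str.isIn_eq, hs]
    simp only [PySem.Chars.isIn, PySem.Chars.find, find_go_single]
    by_cases hm : c ∈ line.toList <;> simp [hm]
  by_cases hm : c ∈ line.toList
  · simp only [hin, hm, if_pos, hfind]
    simp only [PySem.Str.slice, PySem.Chars.slice, PySem.List.slice_to_natCast]
    rw [take_idxOf_eq_takeWhile c _ hm]
  · simp only [hin, hm, hfind, if_false]
    rw [takeWhile_of_not_mem c _ hm, String.ofList_toList]

theorem takeWhile_append_good (p : Char → Bool) (pre rest : List Char)
    (hpre : ∀ x ∈ pre, p x = true) :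
    (pre ++ rest).takeWhile p = pre ++ rest.takeWhile p := by
  induction pre with
  | nil => simp
  | cons a t ih =>
    have := hpre a List.mem_cons_self
    simp [this, ih (fun x hx => hpre x (List.mem_cons_of_mem _ hx))]

-- B's scan computes takeWhile goodChar
theorem altGo_spec (line : String) (pre cs : List Char)
    (h : line.toList = pre ++ cs) (hpre : ∀ x ∈ pre, goodChar x = true) :
    altGo line (PySem.List.enumerate cs (pre.length : Int))
      = String.ofList (line.toList.takeWhile goodChar) := by
  induction cs generalizing pre with
  | nil =>
    have htw : line.toList.takeWhile goodChar = line.toList := by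
      rw [h]
      simpa using takeWhile_append_good goodChar pre [] hpre
    simp [PySem.List.enumerate, altGo, htw, String.ofList_toList]
  | cons c rest ih =>
    by_cases hg : goodChar c = true
    · have h' : line.toList = (pre ++ [c]) ++ rest := by simp [h]
      have hpre' : ∀ x ∈ pre ++ [c], goodChar x = true := by
        intro x hx
        rcases List.mem_append.mp hx with hx | hx
        · exact hpre x hx
        · simp at hx; simpa [hx]
      have := ih (pre ++ [c]) h' hpre'
      have hmem : ¬ c ∈ invalid_chars := by
        have hgd := hg
        simp only [goodChar, Bool.not_eq_eq_eq_not, Bool.not_true] at hgd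
        intro hc
        have : c = '\x01' ∨ c = '\x05' ∨ c = '\n' := by
          simpa [invalid_chars] using hc
        rcases this with h1 | h1 | h1 <;> simp [h1] at hgd
      have hlen : ((pre ++ [c]).length : Int) = (pre.length : Int) + 1 := by
        simp
      rw [hlen] at this
      simpa [PySem.List.enumerate, altGo, hmem] using this
    · have hmem : c ∈ invalid_chars := by
        have hor : c = '\x01' ∨ c = '\x05' ∨ c = '\n' := by
          by_contra hnc
          push Not at hnc
          simp [goodChar, hnc.1, hnc.2.1, hnc.2.2] at hg
        simp only [invalid_chars]
        rcases hor with h1 | h1 | h1 <;> simp [h1]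
      have htw : line.toList.takeWhile goodChar = pre := by
        rw [h, takeWhile_append_good goodChar pre _ hpre]
        simp [hg]
      have htake : line.toList.take pre.length = pre := by
        rw [h]; exact List.take_left' rfl
      simp [PySem.List.enumerate, altGo, hmem, PySem.Str.slice,
        PySem.Chars.slice, PySem.List.slice_to_natCast, htake, htw]

theorem takeWhile_chain (cs : List Char) :
    ((cs.takeWhile (fun x => x != '\x01')).takeWhile (fun x => x != '\x05')).takeWhile
        (fun x => x != '\n')
      = cs.takeWhile goodChar := by
  rw [List.takeWhile_takeWhile, List.takeWhile_takeWhile]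
  congr 1
  funext x
  simp only [goodChar]
  by_cases h1 : x = '\x01' <;> by_cases h2 : x = '\x05' <;> by_cases h3 : x = '\n' <;>
    simp [h1, h2, h3]

-- ===== VERDICT (by name: the statement is the Claim_ definition above) =====
theorem remove_nonmsg_spec : Claim_equal_remove_nonmsg := by
  intro line _ _
  show remove_nonmsg line = remove_nonmsg_alt line
  unfold remove_nonmsg remove_nonmsg_alt
  cases hget : PySem.Str.pyGet? line 10 with
  | none => rfl
  | some c =>
    by_cases hT : c = 'T'
    · simp only [hT, if_true]
    · simp only [hT, if_false]
      have hA : invalid_msg_content.foldl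
          (fun line invalid =>
            if PySem.Str.isIn invalid line then
              PySem.Str.slice line none (some (PySem.Str.find line invalid))
            else line) line
          = String.ofList (line.toList.takeWhile goodChar) := by
        simp only [invalid_msg_content, List.foldl_cons, List.foldl_nil]
        rw [stepStr '\x01' "\x01" rfl line]
        rw [stepStr '\x05' "\x05" rfl _]
        rw [stepStr '\n' "\n" rfl _]
        rw [String.toList_ofList, String.toList_ofList, takeWhile_chain]
      have hB : altGo line (PySem.List.enumerate line.toList)
          = String.ofList (line.toList.takeWhile goodChar) := by
        have := altGo_spec line [] line.toList (by simp) (by simp)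
        simpa using this
      rw [hA, hB]
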